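-- pv_equiv track=rewrite | github.com/eddiethedean/ryact | scripts/apply_parity_burndown_inventory.py | _patch_wave_burndown_v13_dom_manifest_slices
-- ===== SOURCE A (Python) =====
-- def _patch_wave_burndown_v13_dom_manifest_slices(cases: list[dict]) -> int:
--     changed = 0
--     targets: tuple[tuple[str, str, str], ...] = (
--         (
--             "react_dom.ReactDOMComponent-test.reactdomcomponent.custom_attributes."
--             "allows_cased_data_attributes.bc4f3ce5",
--             "react_dom.server.casedDataAttributeSegment",
--             "tests_upstream/react_dom/test_dom_custom_attributes_string_and_cased.py",
--         ),
--         (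
--             "react_dom.ReactDOMComponent-test.reactdomcomponent.custom_attributes."
--             "assigns_a_numeric_custom_attributes_as_a_string.a340c5a5",
--             "react_dom.server.numericCustomDataAttributeStringified",
--             "tests_upstream/react_dom/test_dom_custom_attributes_string_and_cased.py",
--         ),
--     )
--     for row_id, manifest_id, py_test in targets:
--         for c in cases:
--             if c.get("id") != row_id or c.get("status") != "pending":
--                 continue
--             c["status"] = "implemented"
--             c["manifest_id"] = manifest_id
--             c["python_test"] = py_test
--             c["non_goal_rationale"] = None
--             changed += 1
--             break
--     return changed
-- ===== SOURCE B (Python) =====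
-- def _patch_wave_burndown_v13_dom_manifest_slices(cases: list[dict]) -> int:
--     target_map = {
--         "react_dom.ReactDOMComponent-test.reactdomcomponent.custom_attributes."
--         "allows_cased_data_attributes.bc4f3ce5": (
--             "react_dom.server.casedDataAttributeSegment",
--             "tests_upstream/react_dom/test_dom_custom_attributes_string_and_cased.py",
--         ),
--         "react_dom.ReactDOMComponent-test.reactdomcomponent.custom_attributes."
--         "assigns_a_numeric_custom_attributes_as_a_string.a340c5a5": (
--             "react_dom.server.numericCustomDataAttributeStringified",
--             "tests_upstream/react_dom/test_dom_custom_attributes_string_and_cased.py",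
--         ),
--     }
--     changed = 0
--     for c in cases:
--         if c.get("status") != "pending":
--             continue
--         rid = c.get("id")
--         if rid is None:
--             continue
--         hit = target_map.pop(rid, None)
--         if hit is None:
--             continue
--         manifest_id, py_test = hit
--         c["status"] = "implemented"
--         c["manifest_id"] = manifest_id
--         c["python_test"] = py_test
--         c["non_goal_rationale"] = None
--         changed += 1
--     return changed
-- ===== Notes on version B (the rewrite author's own statement) =====
-- stated objective: simpler
-- what changed: Replaces A's target-major nested loops (one scan of cases per target) by a dict of the two targets and a single pass over cases, popping each target when it fires so it applies at most once.
import Mathlib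
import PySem

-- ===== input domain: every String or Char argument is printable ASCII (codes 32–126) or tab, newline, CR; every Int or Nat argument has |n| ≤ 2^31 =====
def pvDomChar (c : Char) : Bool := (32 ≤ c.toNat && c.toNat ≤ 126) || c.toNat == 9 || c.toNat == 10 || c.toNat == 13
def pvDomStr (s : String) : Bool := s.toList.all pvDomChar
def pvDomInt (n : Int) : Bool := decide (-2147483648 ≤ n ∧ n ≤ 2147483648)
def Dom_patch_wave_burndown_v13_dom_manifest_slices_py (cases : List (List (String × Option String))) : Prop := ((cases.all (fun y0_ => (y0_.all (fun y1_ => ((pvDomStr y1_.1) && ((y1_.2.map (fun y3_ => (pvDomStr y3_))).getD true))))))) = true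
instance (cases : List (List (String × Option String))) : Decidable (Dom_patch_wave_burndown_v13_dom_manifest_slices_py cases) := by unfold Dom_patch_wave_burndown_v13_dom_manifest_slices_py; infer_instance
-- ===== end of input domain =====

-- B replaces A's target-major nested scans (one pass over `cases` per target) by a dict of the two
-- targets and ONE pass over `cases`, popping a target when it fires. Both A and B mutate the matched
-- case dicts identically in Python; the theorems here are about the RETURN VALUE (the count) only.

-- shared string literals of both programs
def pvId1 : String := "react_dom.ReactDOMComponent-test.reactdomcomponent.custom_attributes.allows_cased_data_attributes.bc4f3ce5"
def pvId2 : String := "react_dom.ReactDOMComponent-test.reactdomcomponent.custom_attributes.assigns_a_numeric_custom_attributes_as_a_string.a340c5a5"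
def pvMan1 : String := "react_dom.server.casedDataAttributeSegment"
def pvMan2 : String := "react_dom.server.numericCustomDataAttributeStringified"
def pvTestPath : String := "tests_upstream/react_dom/test_dom_custom_attributes_string_and_cased.py"

-- c.get(k) on a Python dict (absent key and a stored None both give None, exactly as in Python)
def pvCaseGet (c : List (String × Option String)) (k : String) : Option String :=
  PySem.Dict.getD (PySem.Dict.mk c) k none

-- ===== PORT A =====
def pvTargets : List (String × String × String) :=
  [(pvId1, pvMan1, pvTestPath), (pvId2, pvMan2, pvTestPath)]

-- the four in-place assignments of A's inner loop body
def pvPatchCase (c : List (String × Option String)) (m p : String) : List (String × Option String) :=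
  (((((PySem.Dict.mk c).insert "status" (some "implemented")).insert "manifest_id" (some m)).insert
      "python_test" (some p)).insert "non_goal_rationale" none).items

-- A's inner 'for c in cases: … continue … break' for one target: returns the updated list and 0 or 1
def pvApplyTarget (row_id m p : String) :
    List (List (String × Option String)) → List (List (String × Option String)) × Int
  | [] => ([], 0)
  | c :: rest =>
    if pvCaseGet c "id" ≠ some row_id ∨ pvCaseGet c "status" ≠ some "pending" then
      let r := pvApplyTarget row_id m p rest
      (c :: r.1, r.2)
    else
      (pvPatchCase c m p :: rest, 1)

def patch_wave_burndown_v13_dom_manifest_slices_py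
    (cases : List (List (String × Option String))) : Int :=
  (pvTargets.foldl
    (fun st t =>
      let r := pvApplyTarget t.1 t.2.1 t.2.2 st.1
      (r.1, st.2 + r.2))
    (cases, (0 : Int))).2

-- ===== PORT B =====
def pvTargetMap : PySem.Dict String (String × String) :=
  (PySem.Dict.empty.insert pvId1 (pvMan1, pvTestPath)).insert pvId2 (pvMan2, pvTestPath)

-- one iteration of B's single loop; state = (remaining target_map, changed)
def pvAltStep (st : PySem.Dict String (String × String) × Int)
    (c : List (String × Option String)) : PySem.Dict String (String × String) × Int :=
  if pvCaseGet c "status" ≠ some "pending" then st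
  else
    match pvCaseGet c "id" with
    | none => st
    | some rid =>
      match PySem.Dict.pop? st.1 rid with
      | none => st
      | some (_, tm') => (tm', st.2 + 1)

def patch_wave_burndown_v13_dom_manifest_slices_py_alt
    (cases : List (List (String × Option String))) : Int :=
  (cases.foldl pvAltStep (pvTargetMap, (0 : Int))).2

-- ===== PRECONDITION & SPEC =====
def Spec_patch_wave_burndown_v13_dom_manifest_slices_py (cases : List (List (String × Option String))) (out : Int) : Prop := out = patch_wave_burndown_v13_dom_manifest_slices_py_alt cases
instance (cases : List (List (String × Option String))) (out : Int) : Decidable (Spec_patch_wave_burndown_v13_dom_manifest_slices_py cases out) := by unfold Spec_patch_wave_burndown_v13_dom_manifest_slices_py; infer_instance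

-- ===== CLAIM (what is proved, stated in full; the proofs are below) =====
def Claim_equal_patch_wave_burndown_v13_dom_manifest_slices_py : Prop := ∀ (cases : List (List (String × Option String))), Dom_patch_wave_burndown_v13_dom_manifest_slices_py cases → Spec_patch_wave_burndown_v13_dom_manifest_slices_py cases (patch_wave_burndown_v13_dom_manifest_slices_py cases)

-- ===== LEMMAS AND PROOFS =====

-- a case fires for target id `rid` iff its "id" is rid and its "status" is "pending"
def pvMatch (rid : String) (c : List (String × Option String)) : Bool :=
  (pvCaseGet c "id" == some rid) && (pvCaseGet c "status" == some "pending")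

theorem pvCaseGet_patch_id (c : List (String × Option String)) (m p : String) :
    pvCaseGet (pvPatchCase c m p) "id" = pvCaseGet c "id" := by
  show PySem.Dict.getD (((((PySem.Dict.mk c).insert "status" (some "implemented")).insert
      "manifest_id" (some m)).insert "python_test" (some p)).insert "non_goal_rationale" none)
      "id" none = pvCaseGet c "id"
  rw [PySem.Dict.getD_insert, if_neg (by decide : ¬("id" = ("non_goal_rationale" : String))),
      PySem.Dict.getD_insert, if_neg (by decide : ¬("id" = ("python_test" : String))),
      PySem.Dict.getD_insert, if_neg (by decide : ¬("id" = ("manifest_id" : String))),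
      PySem.Dict.getD_insert, if_neg (by decide : ¬("id" = ("status" : String)))]
  rfl

theorem pvApplyTarget_snd (rid m p : String) (cs : List (List (String × Option String))) :
    (pvApplyTarget rid m p cs).2 = (if cs.any (pvMatch rid) then 1 else 0) := by
  induction cs with
  | nil => simp [pvApplyTarget]
  | cons c rest ih =>
    by_cases h1 : pvCaseGet c "id" = some rid
    · by_cases h2 : pvCaseGet c "status" = some "pending"
      · simp [pvApplyTarget, pvMatch, h1, h2]
      · simp [pvApplyTarget, pvMatch, h1, h2, ih]
    · simp [pvApplyTarget, pvMatch, h1, ih]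

theorem pvApplyTarget_fst_any (rid rid' m p : String)
    (h : rid' ≠ rid) (cs : List (List (String × Option String))) :
    (pvApplyTarget rid m p cs).1.any (pvMatch rid') = cs.any (pvMatch rid') := by
  have hb : (rid == rid') = false := by
    simpa using fun e => h e.symm
  induction cs with
  | nil => simp [pvApplyTarget]
  | cons c rest ih =>
    by_cases h1 : pvCaseGet c "id" = some rid
    · by_cases h2 : pvCaseGet c "status" = some "pending"
      · have hid : pvCaseGet (pvPatchCase c m p) "id" = some rid := by
          rw [pvCaseGet_patch_id]; exact h1
        simp [pvApplyTarget, h1, h2, pvMatch, hid, hb]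
      · simp [pvApplyTarget, h1, h2, ih]
    · simp [pvApplyTarget, h1, ih]

set_option maxRecDepth 100000 in
theorem pvA_closed (cases : List (List (String × Option String))) :
    patch_wave_burndown_v13_dom_manifest_slices_py cases =
      (if cases.any (pvMatch pvId1) then 1 else 0) +
      (if cases.any (pvMatch pvId2) then 1 else 0) := by
  have hne : pvId2 ≠ pvId1 := by decide
  show (0 + (pvApplyTarget pvId1 pvMan1 pvTestPath cases).2 +
        (pvApplyTarget pvId2 pvMan2 pvTestPath (pvApplyTarget pvId1 pvMan1 pvTestPath cases).1).2) = _
  rw [pvApplyTarget_snd, pvApplyTarget_snd, pvApplyTarget_fst_any _ _ _ _ hne]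
  omega

theorem pvB_foldl_empty (cs : List (List (String × Option String))) (ch : Int) :
    (cs.foldl pvAltStep (PySem.Dict.mk [], ch)).2 = ch := by
  induction cs with
  | nil => rfl
  | cons c rest ih =>
    have hstep : pvAltStep (PySem.Dict.mk [], ch) c = (PySem.Dict.mk [], ch) := by
      by_cases hs : pvCaseGet c "status" = some "pending"
      · cases hid : pvCaseGet c "id" <;>
          simp [pvAltStep, hs, hid, PySem.Dict.pop?, PySem.Dict.get?]
      · simp [pvAltStep, hs]
    rw [List.foldl_cons, hstep, ih]

theorem pvB_foldl_single (r m p : String) (cs : List (List (String × Option String))) (ch : Int) :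
    (cs.foldl pvAltStep (PySem.Dict.mk [(r, (m, p))], ch)).2 =
      ch + (if cs.any (pvMatch r) then 1 else 0) := by
  induction cs generalizing ch with
  | nil => simp
  | cons c rest ih =>
    by_cases hs : pvCaseGet c "status" = some "pending"
    · cases hid : pvCaseGet c "id" with
      | none =>
        have hstep : pvAltStep (PySem.Dict.mk [(r, (m, p))], ch) c
            = (PySem.Dict.mk [(r, (m, p))], ch) := by simp [pvAltStep, hs, hid]
        have hm : pvMatch r c = false := by simp [pvMatch, hid]
        rw [List.foldl_cons, hstep, ih, List.any_cons, hm]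
        simp
      | some rid =>
        by_cases hr : rid = r
        · subst hr
          have hstep : pvAltStep (PySem.Dict.mk [(rid, (m, p))], ch) c
              = (PySem.Dict.mk [], ch + 1) := by
            simp [pvAltStep, hs, hid, PySem.Dict.pop?, PySem.Dict.get?, PySem.Dict.erase,
              List.find?, List.filter]
          have hm : pvMatch rid c = true := by simp [pvMatch, hid, hs]
          rw [List.foldl_cons, hstep, pvB_foldl_empty, List.any_cons, hm]
          simp
        · have hb : (r == rid) = false := by
            simpa using fun e => hr e.symm
          have hstep : pvAltStep (PySem.Dict.mk [(r, (m, p))], ch) c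
              = (PySem.Dict.mk [(r, (m, p))], ch) := by
            simp [pvAltStep, hs, hid, PySem.Dict.pop?, PySem.Dict.get?, List.find?, hb]
          have hm : pvMatch r c = false := by simp [pvMatch, hid, hr]
          rw [List.foldl_cons, hstep, ih, List.any_cons, hm]
          simp
    · have hstep : pvAltStep (PySem.Dict.mk [(r, (m, p))], ch) c
          = (PySem.Dict.mk [(r, (m, p))], ch) := by simp [pvAltStep, hs]
      have hm : pvMatch r c = false := by simp [pvMatch, hs]
      rw [List.foldl_cons, hstep, ih, List.any_cons, hm]
      simp

set_option maxRecDepth 100000 in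
theorem pvB_foldl_two (cs : List (List (String × Option String))) (ch : Int) :
    (cs.foldl pvAltStep (pvTargetMap, ch)).2 =
      ch + (if cs.any (pvMatch pvId1) then 1 else 0) +
      (if cs.any (pvMatch pvId2) then 1 else 0) := by
  have htm : pvTargetMap
      = PySem.Dict.mk [(pvId1, (pvMan1, pvTestPath)), (pvId2, (pvMan2, pvTestPath))] := by
    decide
  have h12 : (pvId1 == pvId2) = false := by decide
  have h21 : (pvId2 == pvId1) = false := by decide
  induction cs generalizing ch with
  | nil => simp
  | cons c rest ih =>
    by_cases hs : pvCaseGet c "status" = some "pending"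
    · cases hid : pvCaseGet c "id" with
      | none =>
        have hstep : pvAltStep (pvTargetMap, ch) c = (pvTargetMap, ch) := by
          simp [pvAltStep, hs, hid]
        have hm1 : pvMatch pvId1 c = false := by simp [pvMatch, hid]
        have hm2 : pvMatch pvId2 c = false := by simp [pvMatch, hid]
        rw [List.foldl_cons, hstep, ih, List.any_cons, List.any_cons, hm1, hm2]
        simp
      | some rid =>
        by_cases hr1 : rid = pvId1
        · subst hr1
          have hstep : pvAltStep (pvTargetMap, ch) c
              = (PySem.Dict.mk [(pvId2, (pvMan2, pvTestPath))], ch + 1) := by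
            simp [pvAltStep, hs, hid, htm, PySem.Dict.pop?, PySem.Dict.get?, PySem.Dict.erase,
              List.filter, h21]
          have hm1 : pvMatch pvId1 c = true := by simp [pvMatch, hid, hs]
          have hm2 : pvMatch pvId2 c = false := by simp [pvMatch, hid, h12]
          rw [List.foldl_cons, hstep, pvB_foldl_single, List.any_cons, List.any_cons, hm1, hm2]
          simp
        · by_cases hr2 : rid = pvId2
          · subst hr2
            have hstep : pvAltStep (pvTargetMap, ch) c
                = (PySem.Dict.mk [(pvId1, (pvMan1, pvTestPath))], ch + 1) := by
              simp [pvAltStep, hs, hid, htm, PySem.Dict.pop?, PySem.Dict.get?, PySem.Dict.erase,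
                List.find?, List.filter, h12]
            have hm1 : pvMatch pvId1 c = false := by simp [pvMatch, hid, h21]
            have hm2 : pvMatch pvId2 c = true := by simp [pvMatch, hid, hs]
            rw [List.foldl_cons, hstep, pvB_foldl_single, List.any_cons, List.any_cons, hm1, hm2]
            simp
            split_ifs <;> omega
          · have e1 : (pvId1 == rid) = false := by
              simpa using fun e => hr1 e.symm
            have e2 : (pvId2 == rid) = false := by
              simpa using fun e => hr2 e.symm
            have hstep : pvAltStep (pvTargetMap, ch) c = (pvTargetMap, ch) := by
              simp [pvAltStep, hs, hid, htm, PySem.Dict.pop?, PySem.Dict.get?, List.find?, e1, e2]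
            have hm1 : pvMatch pvId1 c = false := by simp [pvMatch, hid, hr1]
            have hm2 : pvMatch pvId2 c = false := by simp [pvMatch, hid, hr2]
            rw [List.foldl_cons, hstep, ih, List.any_cons, List.any_cons, hm1, hm2]
            simp
    · have hstep : pvAltStep (pvTargetMap, ch) c = (pvTargetMap, ch) := by
        simp [pvAltStep, hs]
      have hm1 : pvMatch pvId1 c = false := by simp [pvMatch, hs]
      have hm2 : pvMatch pvId2 c = false := by simp [pvMatch, hs]
      rw [List.foldl_cons, hstep, ih, List.any_cons, List.any_cons, hm1, hm2]
      simp

-- ===== VERDICT (by name: the statement is the Claim_ definition above) =====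
theorem patch_wave_burndown_v13_dom_manifest_slices_py_spec : Claim_equal_patch_wave_burndown_v13_dom_manifest_slices_py := by
  intro cases _
  show _ = _
  rw [pvA_closed]
  show _ = (cases.foldl pvAltStep (pvTargetMap, (0 : Int))).2
  rw [pvB_foldl_two]
  omega
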